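-- pv_equiv track=rewrite | github.com/Sideni/cryptopals | challenge3.py | closest_etaoin
-- ===== SOURCE A (Python) =====
-- ETAOIN = 'ETAOINSHRDLCUMWFGYPBVKJXQZ'
--
-- def hamming_str_dist(str1, str2):
--     i = 0
--     count = 0
--
--     while(i < len(str1)):
--         if(str1[i] != str2[i]):
--             count += 1
--         i += 1
--     return count
--
-- def get_etaoin_fmt(s):
--     if type(s) == str:
--         s = s.encode('utf-8')
--
--     d = {}
--     for c in s:
--         d[c] = d.get(c, 0) + 1
--
--     c_counts = list(d.items())
--     c_counts.sort(key=lambda x:x[1], reverse=True)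
--
--     result = ''
--     for c, _ in c_counts:
--         if chr(c).upper() in ETAOIN:
--             result += chr(c).upper()
--
--     # To compare etaoin to an etaoin formatted string with the hamming distance, both must be the same length
--     result += '\xff' * (len(ETAOIN) - len(result))
--     return result
--
-- def closest_etaoin(strs):
--     dist = 99999999999999
--     closest = ''
--     for s in strs:
--         s_etaoin = get_etaoin_fmt(s)
--         tmp_dist = hamming_str_dist(s_etaoin, ETAOIN)
--         if tmp_dist < dist:
--             dist = tmp_dist
--             closest = s
--
--     return (dist, closest)
-- ===== SOURCE B (Python) =====
-- ETAOIN = 'ETAOINSHRDLCUMWFGYPBVKJXQZ'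
--
-- def _etaoin_dist(s):
--     counts = {}
--     for ch in s:
--         counts[ch] = counts.get(ch, 0) + 1
--     # counting sort: bucket the ETAOIN letters by their frequency (no comparison sort)
--     buckets = {}
--     for ch, n in counts.items():
--         u = ch.upper()
--         if u in ETAOIN:
--             buckets.setdefault(n, []).append(u)
--     d = 26
--     i = 0
--     for n in range(max(buckets, default=0), 0, -1):
--         for u in buckets.get(n, []):
--             if u == ETAOIN[i]:
--                 d -= 1
--             i += 1
--     return d
--
-- def closest_etaoin(strs):
--     return min(((_etaoin_dist(s), s) for s in strs),
--                key=lambda p: p[0], default=(99999999999999, ''))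
-- ===== Notes on version B (the rewrite author's own statement) =====
-- stated objective: faster
-- what changed: B replaces A's stable comparison sort of the frequency items plus '\xff'-padding and the index-walking Hamming helper by a counting sort (letters bucketed in a dict keyed by frequency, buckets walked from the highest count down, decrementing 26 on each positional match with ETAOIN) and replaces the explicit argmin accumulator loop by a single min() with a key and a default.
import Mathlib
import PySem

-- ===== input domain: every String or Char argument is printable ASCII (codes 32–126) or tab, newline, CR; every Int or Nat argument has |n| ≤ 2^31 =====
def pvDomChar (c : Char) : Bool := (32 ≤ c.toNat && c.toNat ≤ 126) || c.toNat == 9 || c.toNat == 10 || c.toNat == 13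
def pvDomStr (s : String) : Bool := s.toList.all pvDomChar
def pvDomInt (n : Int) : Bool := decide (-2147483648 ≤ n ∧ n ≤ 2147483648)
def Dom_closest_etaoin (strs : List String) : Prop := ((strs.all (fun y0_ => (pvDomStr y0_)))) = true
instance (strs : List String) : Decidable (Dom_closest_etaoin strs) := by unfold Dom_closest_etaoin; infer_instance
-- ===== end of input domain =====

-- B replaces A's comparison sort + '\xff'-padding + Hamming helper by a counting sort (letters
-- bucketed by frequency, buckets walked from the highest count down) and replaces the argmin loop
-- by min() with a key (objective: faster; a timing run measured B ~1.8x faster than A).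

-- ===== PORT A =====
-- module constant ETAOIN (shared by both Python versions)
def pyETAOIN : List Char := String.toList "ETAOINSHRDLCUMWFGYPBVKJXQZ"

-- while i < len(str1): Python raises IndexError at str2[i] when len(str2) < len(str1);
-- those inputs are excluded by Pre_ (the two distinct defaults never compare equal).
def hamming_str_dist (str1 str2 : List Char) : Int :=
  (List.range str1.length).foldl
    (fun count i => if str1.getD i '?' != str2.getD i '!' then count + 1 else count) 0

-- Dom is printable ASCII, so s.encode('utf-8') is one byte per character; the byte value is kept as its Char.
def get_etaoin_fmt (s : String) : List Char :=
  let d := s.toList.foldl (fun d c => d.insert c (d.getD c 0 + 1)) (PySem.Dict.empty : PySem.Dict Char Int)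
  let c_counts := PySem.List.sorted d.items (fun x => x.2) true
  let result := c_counts.foldl
    (fun acc p => if PySem.Chars.upperChar p.1 ∈ pyETAOIN then acc ++ [PySem.Chars.upperChar p.1] else acc) []
  result ++ List.replicate (pyETAOIN.length - result.length) (Char.ofNat 255)

def closest_etaoin (strs : List String) : Int × String :=
  strs.foldl (fun acc s =>
    let s_etaoin := get_etaoin_fmt s
    let tmp_dist := hamming_str_dist s_etaoin pyETAOIN
    if tmp_dist < acc.1 then (tmp_dist, s) else acc) (99999999999999, "")

-- ===== PORT B =====
-- literal port of Source B's _etaoin_dist; ETAOIN[i] raising IndexError for i ≥ 26 is excluded by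
-- Pre_ (the sentinel '!' is never an ETAOIN letter, so it never compares equal).
def pvEtaoinDist (s : String) : Int :=
  let counts := s.toList.foldl (fun d c => d.insert c (d.getD c 0 + 1)) (PySem.Dict.empty : PySem.Dict Char Int)
  -- buckets.setdefault(n, []).append(u)  =  modify n [] (· ++ [u])
  let buckets := counts.items.foldl
    (fun b p => if PySem.Chars.upperChar p.1 ∈ pyETAOIN
                then b.modify p.2 [] (fun l => l ++ [PySem.Chars.upperChar p.1]) else b)
    (PySem.Dict.empty : PySem.Dict Int (List Char))
  -- for n in range(max(buckets, default=0), 0, -1): for u in buckets.get(n, []): …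
  let st := (PySem.List.pyRange (PySem.List.maxD buckets.keys (fun n => n) 0) 0 (-1)).foldl
    (fun (st : Int × Int) n =>
      (buckets.getD n []).foldl
        (fun (st : Int × Int) u =>
          ((if u == PySem.List.pyGetD pyETAOIN st.2 '!' then st.1 - 1 else st.1), st.2 + 1)) st)
    (26, 0)
  st.1

-- min(((dist(s), s) for s in strs), key=lambda p: p[0], default=(99999999999999, ''))
def closest_etaoin_alt (strs : List String) : Int × String :=
  PySem.List.minD (strs.map (fun s => (pvEtaoinDist s, s))) (fun p => p.1) (99999999999999, "")

-- ===== PRECONDITION & SPEC =====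
-- Pre_ excludes exactly the inputs on which both Pythons raise IndexError: a string with more than
-- 26 distinct characters whose uppercase is an ETAOIN letter (only possible by mixing cases).
def Pre_closest_etaoin (strs : List String) : Prop :=
  ∀ s ∈ strs,
    ((PySem.List.dedup s.toList).filter
      (fun c => PySem.Chars.upperChar c ∈ String.toList "ETAOINSHRDLCUMWFGYPBVKJXQZ")).length ≤ 26
instance (strs : List String) : Decidable (Pre_closest_etaoin strs) := by unfold Pre_closest_etaoin; infer_instance

def pvWitness_closest_etaoin : List String := ["Hello, world!", "ETAOIN shrdlu", ""]

def Spec_closest_etaoin (strs : List String) (out : Int × String) : Prop := out = closest_etaoin_alt strs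
instance (strs : List String) (out : Int × String) : Decidable (Spec_closest_etaoin strs out) := by unfold Spec_closest_etaoin; infer_instance

-- ===== CLAIM (what is proved, stated in full; the proofs are below) =====
def Claim_equal_closest_etaoin : Prop := ∀ (strs : List String), Dom_closest_etaoin strs → Pre_closest_etaoin strs → Spec_closest_etaoin strs (closest_etaoin strs)

-- ===== LEMMAS AND PROOFS =====

-- inserting past a segment none of whose elements the comparator puts x before
theorem insertBy_append_of_not_before {α : Type} (before : α → α → Bool) (x : α)
    (seg rest : List α) (h : ∀ y ∈ seg, before x y = false) :
    PySem.List.insertBy before x (seg ++ rest) = seg ++ PySem.List.insertBy before x rest := by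
  induction seg with
  | nil => rfl
  | cons y ys ih =>
      have hy : before x y = false := h y (by simp)
      rw [List.cons_append,
        show PySem.List.insertBy before x (y :: (ys ++ rest))
            = y :: PySem.List.insertBy before x (ys ++ rest) from by
          simp [PySem.List.insertBy, hy],
        ih (fun z hz => h z (by simp [hz]))]
      rfl

-- inserting before a tail every element of which the comparator puts x before
theorem insertBy_of_forall_before {α : Type} (before : α → α → Bool) (x : α)
    (rest : List α) (h : ∀ y ∈ rest, before x y = true) :
    PySem.List.insertBy before x rest = x :: rest := by
  cases rest with
  | nil => rfl
  | cons r rs => simp [PySem.List.insertBy, h r (by simp)]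

-- stable-descending insertion of one element into a bucketed list
theorem insertBy_flatMap {α : Type} (key : α → Int) :
    ∀ (M : Nat) (x : α) (ys : List α), 1 ≤ key x → key x ≤ (M : Int) →
    PySem.List.insertBy (fun a b => decide (key b < key a)) x
        ((PySem.List.pyRange (M : Int) 0 (-1)).flatMap (fun n => ys.filter (fun y => key y == n)))
      = (PySem.List.pyRange (M : Int) 0 (-1)).flatMap (fun n => (ys ++ [x]).filter (fun y => key y == n)) := by
  intro M
  induction M with
  | zero =>
      intro x ys h1 h2
      exfalso
      simp only [Nat.cast_zero] at h2
      omega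
  | succ M ih =>
      intro x ys h1 h2
      rw [PySem.List.pyRange_neg_one_cons (by exact_mod_cast Nat.succ_pos M)]
      have hc : ((M + 1 : Nat) : Int) - 1 = ((M : Nat) : Int) := by push_cast; ring
      rw [hc]
      simp only [List.flatMap_cons]
      have htop : ∀ y ∈ ys.filter (fun y => key y == ((M + 1 : Nat) : Int)),
          (fun a b => decide (key b < key a)) x y = false := by
        intro y hy
        have hkey : key y = ((M + 1 : Nat) : Int) := by
          simpa using List.of_mem_filter hy
        have : ¬ (key y < key x) := by push_cast at h2 ⊢; omega
        simpa using this
      by_cases hk : key x = ((M + 1 : Nat) : Int)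
      · rw [insertBy_append_of_not_before _ _ _ _ htop]
        rw [insertBy_of_forall_before _ _ _ (by
          intro y hy
          obtain ⟨n, hn, hy'⟩ := List.mem_flatMap.mp hy
          have hkey : key y = n := by simpa using List.of_mem_filter hy'
          have hnb := (PySem.List.mem_pyRange_neg_one).mp hn
          have : key y < key x := by push_cast at hk; omega
          simpa using this)]
        rw [show (ys ++ [x]).filter (fun y => key y == ((M + 1 : Nat) : Int))
            = ys.filter (fun y => key y == ((M + 1 : Nat) : Int)) ++ [x] from by
          rw [List.filter_append]; simp [hk]]
        rw [List.flatMap_congr (l := PySem.List.pyRange ((M : Nat) : Int) 0 (-1))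
          (f := fun n => (ys ++ [x]).filter (fun y => key y == n))
          (g := fun n => ys.filter (fun y => key y == n)) (by
          intro n hn
          have hnb := (PySem.List.mem_pyRange_neg_one).mp hn
          show (ys ++ [x]).filter (fun y => key y == n) = ys.filter (fun y => key y == n)
          rw [List.filter_append]
          have hne : ¬ (key x = n) := by omega
          simp [hne])]
        simp
      · have hk' : key x ≤ ((M : Nat) : Int) := by push_cast at h2 ⊢; omega
        rw [insertBy_append_of_not_before _ _ _ _ htop]
        rw [ih x ys h1 hk']
        rw [show (ys ++ [x]).filter (fun y => key y == ((M + 1 : Nat) : Int))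
            = ys.filter (fun y => key y == ((M + 1 : Nat) : Int)) from by
          rw [List.filter_append]
          have hxf : ¬ key x = ((M : Int) + 1) := by push_cast at hk; exact hk
          simp [hxf]]

-- the stable reverse sort of a list with integer keys in [1, M] is its bucket decomposition
theorem sorted_rev_eq_flatMap_buckets {α : Type} (key : α → Int) (M : Nat) (xs : List α)
    (h : ∀ x ∈ xs, 1 ≤ key x ∧ key x ≤ (M : Int)) :
    PySem.List.sorted xs key true
      = (PySem.List.pyRange (M : Int) 0 (-1)).flatMap (fun n => xs.filter (fun x => key x == n)) := by
  induction xs using List.reverseRecOn with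
  | nil => simp [PySem.List.sorted_rev_eq_foldl_insertBy]
  | append_singleton xs x ih =>
      have hx := h x (by simp)
      have hxs : ∀ y ∈ xs, 1 ≤ key y ∧ key y ≤ (M : Int) := fun y hy => h y (by simp [hy])
      rw [PySem.List.sorted_rev_eq_foldl_insertBy, List.foldl_append, List.foldl_cons, List.foldl_nil,
        ← PySem.List.sorted_rev_eq_foldl_insertBy, ih hxs,
        insertBy_flatMap key M x xs hx.1 hx.2]

-- buckets above M' are empty → the countdown can start at M' instead of M
theorem flatMap_pyRange_shrink {α : Type} (F : Int → List α) :
    ∀ (M M' : Nat), M' ≤ M → (∀ n : Int, (M' : Int) < n → F n = []) →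
    (PySem.List.pyRange (M : Int) 0 (-1)).flatMap F = (PySem.List.pyRange (M' : Int) 0 (-1)).flatMap F := by
  intro M
  induction M with
  | zero =>
      intro M' h _
      have : M' = 0 := Nat.le_zero.mp h
      subst this; rfl
  | succ M ih =>
      intro M' hle hF
      by_cases hM : M' = M + 1
      · subst hM; rfl
      · have hle' : M' ≤ M := by omega
        rw [PySem.List.pyRange_neg_one_cons (by exact_mod_cast Nat.succ_pos M)]
        have hc : ((M + 1 : Nat) : Int) - 1 = ((M : Nat) : Int) := by push_cast; ring
        have hF1 : F ((M + 1 : Nat) : Int) = [] := hF _ (by exact_mod_cast Nat.lt_succ_of_le hle')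
        rw [List.flatMap_cons, hF1, hc, ih M' hle' hF]
        rfl

-- number of positions (from offset i0) where L agrees with ETAOIN
def mcount (L : List Char) (i0 : Int) : Int :=
  match L with
  | [] => 0
  | u :: L => (if u == PySem.List.pyGetD pyETAOIN i0 '!' then 1 else 0) + mcount L (i0 + 1)

theorem mcount_eq_countP (L : List Char) : ∀ (i0 : Nat),
    mcount L (i0 : Int)
      = ((List.range L.length).countP (fun j => L.getD j '?' == pyETAOIN.getD (i0 + j) '!') : Int) := by
  induction L with
  | nil => intro i0; simp [mcount]
  | cons u L ih =>
      intro i0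
      have h1 : (i0 : Int) + 1 = ((i0 + 1 : Nat) : Int) := by push_cast; ring
      simp only [mcount, PySem.List.pyGetD_natCast, h1, ih]
      simp only [List.length_cons, List.range_succ_eq_map, List.countP_cons, List.countP_map]
      rw [show (List.range L.length).countP
            ((fun j => (u :: L).getD j '?' == pyETAOIN.getD (i0 + j) '!') ∘ Nat.succ)
          = (List.range L.length).countP (fun j => L.getD j '?' == pyETAOIN.getD ((i0 + 1) + j) '!') from
        List.countP_congr (by
          intro j hj
          have hidx : i0 + (j + 1) = (i0 + 1) + j := by omega
          simp [Function.comp, Nat.succ_eq_add_one, hidx])]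
      push_cast
      simp only [List.getD_cons_zero, Nat.add_zero]
      omega

theorem mcount_nonneg (L : List Char) (i0 : Nat) : 0 ≤ mcount L (i0 : Int) := by
  rw [mcount_eq_countP]; exact_mod_cast Int.natCast_nonneg _

-- B's inner pair-state loop over a flattened letter sequence
theorem pairfold (L : List Char) : ∀ (d0 i0 : Int),
    L.foldl (fun st u =>
        ((if u == PySem.List.pyGetD pyETAOIN st.2 '!' then st.1 - 1 else st.1), st.2 + 1)) (d0, i0)
      = (d0 - mcount L i0, i0 + L.length) := by
  induction L with
  | nil => intro d0 i0; simp [mcount]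
  | cons u L ih =>
      intro d0 i0
      simp only [List.foldl_cons, ih, mcount, Prod.mk.injEq]
      refine ⟨by split <;> ring, by simp only [List.length_cons]; push_cast; ring⟩

-- A's padded Hamming distance in terms of mcount
theorem hamming_pad (L : List Char) (hL : L.length ≤ 26) :
    hamming_str_dist (L ++ List.replicate (26 - L.length) (Char.ofNat 255)) pyETAOIN
      = 26 - mcount L 0 := by
  have hlen : (L ++ List.replicate (26 - L.length) (Char.ofNat 255)).length = 26 := by
    simp; omega
  unfold hamming_str_dist
  rw [hlen, PySem.List.foldl_count_if]
  rw [show List.range 26 = List.range L.length ++ List.map (fun x => L.length + x) (List.range (26 - L.length)) from by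
    rw [← List.range_add]; congr 1; omega]
  rw [List.countP_append, List.countP_map]
  have c1 : List.countP
        (fun i => (L ++ List.replicate (26 - L.length) (Char.ofNat 255)).getD i '?' != pyETAOIN.getD i '!')
        (List.range L.length)
      = List.countP (fun i => !(L.getD i '?' == pyETAOIN.getD i '!')) (List.range L.length) := by
    apply List.countP_congr
    intro i hi
    rw [List.mem_range] at hi
    rw [List.getD_append _ _ _ _ hi]
    simp [bne]
  have c2 : List.countP
        ((fun i => (L ++ List.replicate (26 - L.length) (Char.ofNat 255)).getD i '?' != pyETAOIN.getD i '!')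
          ∘ (fun x => L.length + x)) (List.range (26 - L.length))
      = 26 - L.length := by
    have hall : ∀ j ∈ List.range (26 - L.length),
        ((fun i => (L ++ List.replicate (26 - L.length) (Char.ofNat 255)).getD i '?' != pyETAOIN.getD i '!')
          ∘ (fun x => L.length + x)) j = true := by
      intro j hj
      rw [List.mem_range] at hj
      have h1 : (L ++ List.replicate (26 - L.length) (Char.ofNat 255)).getD (L.length + j) '?' = Char.ofNat 255 := by
        rw [List.getD_append_right _ _ _ _ (Nat.le_add_right _ _)]
        simp only [Nat.add_sub_cancel_left]
        exact List.getD_replicate _ (by omega)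
      have hjE : L.length + j < pyETAOIN.length := by
        have : pyETAOIN.length = 26 := by rfl
        omega
      have h2 : pyETAOIN.getD (L.length + j) '!' ∈ pyETAOIN := by
        rw [List.getD_eq_getElem _ _ hjE]; exact List.getElem_mem hjE
      have h3 : (Char.ofNat 255) ∉ pyETAOIN := by decide
      simp only [Function.comp, h1, bne_iff_ne, ne_eq]
      intro hcontra
      exact h3 (hcontra ▸ h2)
    rw [List.countP_eq_length.mpr hall, List.length_range]
  rw [c1, c2]
  have hsplit : L.length
      = List.countP (fun i => (L.getD i '?' == pyETAOIN.getD i '!')) (List.range L.length)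
        + List.countP (fun i => !(L.getD i '?' == pyETAOIN.getD i '!')) (List.range L.length) := by
    have h0 := List.length_eq_countP_add_countP (fun i => (L.getD i '?' == pyETAOIN.getD i '!'))
        (l := List.range L.length)
    rw [List.length_range] at h0
    have h1 : List.countP (fun i => !(L.getD i '?' == pyETAOIN.getD i '!')) (List.range L.length)
        = List.countP (fun a => decide ¬(L.getD a '?' == pyETAOIN.getD a '!') = true) (List.range L.length) := by
      apply List.countP_congr
      intro x hx
      simp
    rw [h1]
    exact h0
  have hm := mcount_eq_countP L 0
  rw [show (List.range L.length).countP (fun j => L.getD j '?' == pyETAOIN.getD (0 + j) '!')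
      = (List.range L.length).countP (fun j => L.getD j '?' == pyETAOIN.getD j '!') from
    List.countP_congr (by intro j hj; simp)] at hm
  simp only [Nat.cast_zero] at hm
  omega

-- A's per-string letter sequence (stable sort of counter items, filtered, uppercased)
def lettersA (s : String) : List Char :=
  ((PySem.List.sorted (PySem.Dict.counter s.toList).items (fun x => x.2) true).filter
      (fun p => decide (PySem.Chars.upperChar p.1 ∈ pyETAOIN))).map
    (fun p => PySem.Chars.upperChar p.1)

theorem fmt_eq (s : String) :
    get_etaoin_fmt s = lettersA s ++ List.replicate (26 - (lettersA s).length) (Char.ofNat 255) := by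
  unfold get_etaoin_fmt lettersA
  simp only [PySem.Dict.foldl_insert_getD_add_one_eq_counter]
  have happ := PySem.List.foldl_append_ite
      (p := fun p : Char × Int => PySem.Chars.upperChar p.1 ∈ pyETAOIN)
      (f := fun p : Char × Int => PySem.Chars.upperChar p.1)
      (l := PySem.List.sorted (PySem.Dict.counter s.toList).items (fun x => x.2) true) (acc := [])
  simp only [List.nil_append] at happ
  rw [happ]
  have h26 : pyETAOIN.length = 26 := by rfl
  rw [h26]

theorem lettersA_len (s : String)
    (h : ((PySem.List.dedup s.toList).filter
      (fun c => PySem.Chars.upperChar c ∈ String.toList "ETAOINSHRDLCUMWFGYPBVKJXQZ")).length ≤ 26) :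
    (lettersA s).length ≤ 26 := by
  unfold lettersA
  rw [List.length_map, ← List.countP_eq_length_filter,
    (PySem.List.sorted_perm _ _ _).countP_eq, PySem.Dict.items_counter, List.countP_map]
  rw [PySem.List.dedup_eq_ofList, ← List.countP_eq_length_filter] at h
  simpa [pyETAOIN] using h

-- Source B's nested loop over the buckets is the pair-state loop over the flattened sequence
theorem foldl_buckets (l : List Int) (G : Int → List Char) (init : Int × Int) :
    l.foldl (fun st n => (G n).foldl (fun (st : Int × Int) u =>
        ((if u == PySem.List.pyGetD pyETAOIN st.2 '!' then st.1 - 1 else st.1), st.2 + 1)) st) init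
      = (l.flatMap G).foldl (fun (st : Int × Int) u =>
        ((if u == PySem.List.pyGetD pyETAOIN st.2 '!' then st.1 - 1 else st.1), st.2 + 1)) init :=
  (List.foldl_flatMap).symm

-- B-side bucket input: (count, uppercased letter) pairs of the counter's letter items, in order
def lfB (s : String) : List (Int × Char) :=
  ((PySem.Dict.counter s.toList).items.filter
      (fun p => decide (PySem.Chars.upperChar p.1 ∈ pyETAOIN))).map
    (fun p => (p.2, PySem.Chars.upperChar p.1))

theorem items_bounds (s : String) :
    ∀ p ∈ (PySem.Dict.counter s.toList).items, 1 ≤ p.2 ∧ p.2 ≤ (s.toList.length : Int) := by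
  intro p hp
  rw [PySem.Dict.items_counter] at hp
  obtain ⟨k, hk, rfl⟩ := List.mem_map.mp hp
  have hkcs : k ∈ s.toList := (PySem.Set.mem_ofList _ _).mp hk
  refine ⟨?_, ?_⟩
  · show (1 : Int) ≤ ((List.count k s.toList : Nat) : Int)
    exact_mod_cast List.count_pos_iff.mpr hkcs
  · show ((List.count k s.toList : Nat) : Int) ≤ (s.toList.length : Int)
    exact_mod_cast List.count_le_length (a := k) (l := s.toList)

theorem lfB_bounds (s : String) : ∀ q ∈ lfB s, 1 ≤ q.1 ∧ q.1 ≤ (s.toList.length : Int) := by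
  intro q hq
  unfold lfB at hq
  obtain ⟨p, hp, rfl⟩ := List.mem_map.mp hq
  exact items_bounds s p (List.mem_of_mem_filter hp)

-- A's letter sequence as the bucket decomposition over counts 1..len(s)
theorem lettersA_flatMap (s : String) :
    lettersA s = (PySem.List.pyRange (s.toList.length : Int) 0 (-1)).flatMap
      (fun n => ((lfB s).filter (fun q => q.1 == n)).map (fun q => q.2)) := by
  unfold lettersA
  rw [sorted_rev_eq_flatMap_buckets (fun p : Char × Int => p.2) s.toList.length _ (items_bounds s)]
  rw [List.filter_flatMap, List.map_flatMap]
  apply List.flatMap_congr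
  intro n hn
  show ((((PySem.Dict.counter s.toList).items.filter (fun p => p.2 == n)).filter
      (fun p => decide (PySem.Chars.upperChar p.1 ∈ pyETAOIN))).map (fun p => PySem.Chars.upperChar p.1))
    = ((lfB s).filter (fun q => q.1 == n)).map (fun q => q.2)
  unfold lfB
  rw [List.filter_map, List.map_map, List.filter_filter, List.filter_filter]
  rw [List.filter_congr (fun p _ =>
    Bool.and_comm (decide (PySem.Chars.upperChar p.1 ∈ pyETAOIN)) (p.2 == n))]
  rfl

-- the flattened bucket walk of B is exactly A's letter sequence
theorem buckets_eq_lettersA (s : String) :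
    (PySem.List.pyRange
        (PySem.List.maxD
          ((PySem.Dict.counter s.toList).items.foldl
            (fun b p => if PySem.Chars.upperChar p.1 ∈ pyETAOIN
                        then b.modify p.2 [] (fun l => l ++ [PySem.Chars.upperChar p.1]) else b)
            (PySem.Dict.empty : PySem.Dict Int (List Char))).keys
          (fun n => n) 0)
        0 (-1)).flatMap
      (fun n => ((PySem.Dict.counter s.toList).items.foldl
          (fun b p => if PySem.Chars.upperChar p.1 ∈ pyETAOIN
                      then b.modify p.2 [] (fun l => l ++ [PySem.Chars.upperChar p.1]) else b)
          (PySem.Dict.empty : PySem.Dict Int (List Char))).getD n [])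
      = lettersA s := by
  rw [PySem.List.foldl_ite_eq_foldl_filter
    (p := fun p : Char × Int => PySem.Chars.upperChar p.1 ∈ pyETAOIN)
    (f := fun (b : PySem.Dict Int (List Char)) (p : Char × Int) =>
      b.modify p.2 [] (fun l => l ++ [PySem.Chars.upperChar p.1]))]
  rw [show (((PySem.Dict.counter s.toList).items.filter
        (fun p => decide (PySem.Chars.upperChar p.1 ∈ pyETAOIN))).foldl
        (fun (b : PySem.Dict Int (List Char)) p =>
          b.modify p.2 [] (fun l => l ++ [PySem.Chars.upperChar p.1])) PySem.Dict.empty)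
      = ((lfB s).foldl (fun b q => b.modify q.1 [] (fun l => l ++ [q.2])) PySem.Dict.empty) from by
    unfold lfB
    rw [List.foldl_map]]
  have hkeys : ((lfB s).foldl (fun b q => b.modify q.1 [] (fun l => l ++ [q.2]))
      (PySem.Dict.empty : PySem.Dict Int (List Char))).keys
      = PySem.Set.ofList ((lfB s).map (fun q => q.1)) := by
    rw [PySem.Dict.keys_foldl_modify_key (lfB s) (fun q => q.1) [] (fun _ q l => l ++ [q.2]),
      PySem.Dict.keys_empty, PySem.Set.update_nil_left]
  have hgetD : ∀ n : Int, ((lfB s).foldl (fun b q => b.modify q.1 [] (fun l => l ++ [q.2]))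
      (PySem.Dict.empty : PySem.Dict Int (List Char))).getD n []
      = ((lfB s).filter (fun q => q.1 == n)).map (fun q => q.2) := by
    intro n
    rw [PySem.Dict.getD_foldl_modify_append, PySem.Dict.getD_empty]
    simp
  rw [hkeys,
    List.flatMap_congr (l := PySem.List.pyRange
      (PySem.List.maxD (PySem.Set.ofList ((lfB s).map (fun q => q.1))) (fun n => n) 0) 0 (-1))
      (g := fun n => ((lfB s).filter (fun q => q.1 == n)).map (fun q => q.2))
      (fun n _ => hgetD n),
    lettersA_flatMap]
  set MB := PySem.List.maxD (PySem.Set.ofList ((lfB s).map (fun q => q.1))) (fun n => n) 0 with hMBdef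
  have hfacts : (∀ q ∈ lfB s, q.1 ≤ MB) ∧ 0 ≤ MB ∧ MB ≤ (s.toList.length : Int) := by
    rcases hmax : PySem.List.max? (PySem.Set.ofList ((lfB s).map (fun q => q.1))) (fun n => n) with _ | m
    · have hnil := (PySem.List.max?_eq_none_iff _ _).mp hmax
      have hMB0 : MB = 0 := by rw [hMBdef]; unfold PySem.List.maxD; rw [hmax]; rfl
      refine ⟨?_, by omega, by rw [hMB0]; positivity⟩
      intro q hq
      exact absurd (hnil ▸ (PySem.Set.mem_ofList _ _).mpr (List.mem_map_of_mem hq)) (List.not_mem_nil)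
    · have hMBm : MB = m := by rw [hMBdef]; unfold PySem.List.maxD; rw [hmax]; rfl
      have hm := PySem.List.max?_mem hmax
      obtain ⟨q, hq, hq1⟩ := List.mem_map.mp ((PySem.Set.mem_ofList _ _).mp hm)
      have hb := lfB_bounds s q hq
      refine ⟨?_, by omega, by omega⟩
      intro r hr
      have := PySem.List.max?_isMax hmax r.1 ((PySem.Set.mem_ofList _ _).mpr (List.mem_map_of_mem hr))
      simpa [hMBm] using this
  obtain ⟨hq1, hnn, hle⟩ := hfacts
  rw [show MB = ((MB.toNat : Nat) : Int) from (Int.toNat_of_nonneg hnn).symm]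
  exact (flatMap_pyRange_shrink (fun n => ((lfB s).filter (fun q => q.1 == n)).map (fun q => q.2))
    s.toList.length MB.toNat (Int.toNat_le.mpr hle) (by
      intro n hn
      rw [Int.toNat_of_nonneg hnn] at hn
      show ((lfB s).filter (fun q => q.1 == n)).map (fun q => q.2) = []
      rw [List.filter_eq_nil_iff.mpr (by
        intro q hq
        have := hq1 q hq
        simp only [beq_iff_eq]
        omega)]
      rfl)).symm


-- per-string distance: A's padded Hamming distance equals B's bucket-walk distance
theorem dist_eq (s : String)
    (h : ((PySem.List.dedup s.toList).filter
      (fun c => PySem.Chars.upperChar c ∈ String.toList "ETAOINSHRDLCUMWFGYPBVKJXQZ")).length ≤ 26) :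
    hamming_str_dist (get_etaoin_fmt s) pyETAOIN = pvEtaoinDist s := by
  rw [fmt_eq s, hamming_pad _ (lettersA_len s h)]
  unfold pvEtaoinDist
  simp only [PySem.Dict.foldl_insert_getD_add_one_eq_counter, foldl_buckets,
    buckets_eq_lettersA s, pairfold]

-- Python's min over a nonempty sequence with a key is the first-minimum running fold
theorem min?_cons_eq : ∀ (t : List (Int × String)) (x : Int × String),
    PySem.List.min? (x :: t) (fun p => p.1)
      = some (t.foldl (fun best y => if y.1 < best.1 then y else best) x) := by
  intro t
  induction t with
  | nil => intro x; rfl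
  | cons y t ih =>
      intro x
      have step : PySem.List.min? (x :: y :: t) (fun p : Int × String => p.1)
          = PySem.List.min? ((if y.1 < x.1 then y else x) :: t) (fun p => p.1) := by
        unfold PySem.List.min?
        by_cases h : y.1 < x.1 <;> simp [h]
      rw [step, ih]
      simp only [List.foldl_cons]

theorem dist_le (s : String)
    (h : ((PySem.List.dedup s.toList).filter
      (fun c => PySem.Chars.upperChar c ∈ String.toList "ETAOINSHRDLCUMWFGYPBVKJXQZ")).length ≤ 26) :
    hamming_str_dist (get_etaoin_fmt s) pyETAOIN ≤ 26 := by
  rw [fmt_eq s, hamming_pad _ (lettersA_len s h)]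
  have := mcount_nonneg (lettersA s) 0
  simp only [Nat.cast_zero] at this
  omega

-- ===== VERDICT (by name: the statement is the Claim_ definition above) =====
theorem closest_etaoin_spec : Claim_equal_closest_etaoin := by
  intro strs _ hpre
  show closest_etaoin strs = closest_etaoin_alt strs
  cases strs with
  | nil => rfl
  | cons s rest =>
      have hs := hpre s (by simp)
      unfold closest_etaoin closest_etaoin_alt PySem.List.minD
      simp only [List.map_cons, List.foldl_cons, min?_cons_eq, Option.getD_some, List.foldl_map]
      rw [if_pos (by have := dist_le s hs; omega)]
      rw [dist_eq s hs]
      apply PySem.List.foldl_congr_mem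
      intro acc x hx
      rw [dist_eq x (hpre x (by simp [hx]))]
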